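-- pv_equiv track=rewrite | github.com/orion-orion/SICP-Python | chapter2.构造数据抽象/2.3.符号数据/2.3.3.集合的表示.py | intersection_set
-- ===== SOURCE A (Python) =====
-- def intersection_set(set1, set2):
--     if not set1 or not set2:
--         return []
--     else:
--         x1, x2 = set1[0], set2[0]
--         if x1 == x2:
--             return [x1] + intersection_set(set1[1:], set2[1: ])
--         elif x1 < x2:
--             return intersection_set(set1[1: ], set2)
--         elif x2 < x1:
--             return intersection_set(set1, set2[1: ])
-- ===== SOURCE B (Python) =====
-- def intersection_set(set1, set2):
--     # iterative two-pointer merge scan over indices (no slicing, no recursion)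
--     i = j = 0
--     n, m = len(set1), len(set2)
--     out = []
--     while i < n and j < m:
--         a, b = set1[i], set2[j]
--         if a == b:
--             out.append(a)
--             i += 1
--             j += 1
--         elif a < b:
--             i += 1
--         else:
--             j += 1
--     return out
-- ===== Notes on version B (the rewrite author's own statement) =====
-- stated objective: faster
-- what changed: Replaces the recursion that copies list tails via slicing at every step with an iterative two-pointer index scan that never copies the lists.
import Mathlib
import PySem

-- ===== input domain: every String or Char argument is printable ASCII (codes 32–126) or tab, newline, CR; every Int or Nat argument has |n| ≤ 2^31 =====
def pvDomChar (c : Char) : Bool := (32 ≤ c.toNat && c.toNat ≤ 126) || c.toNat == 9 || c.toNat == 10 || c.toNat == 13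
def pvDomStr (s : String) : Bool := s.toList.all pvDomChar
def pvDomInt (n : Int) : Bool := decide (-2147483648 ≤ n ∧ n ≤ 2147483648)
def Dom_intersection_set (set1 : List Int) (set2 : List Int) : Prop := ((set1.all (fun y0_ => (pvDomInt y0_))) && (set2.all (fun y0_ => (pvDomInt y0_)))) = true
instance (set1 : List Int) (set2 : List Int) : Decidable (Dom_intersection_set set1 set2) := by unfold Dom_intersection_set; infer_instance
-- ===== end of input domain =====

-- B replaces A's tail-slicing recursion with an iterative two-pointer index scan (asymptotically faster: no list copies).

-- ===== PORT A =====
-- A recurses on the tails set1[1:], set2[1:]; slicing a nonempty list from 1 is its tail.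
def intersection_set (set1 : List Int) (set2 : List Int) : List Int :=
  match set1, set2 with
  | [], _ => []
  | _, [] => []
  | x1 :: t1, x2 :: t2 =>
    if x1 = x2 then x1 :: intersection_set t1 t2
    else if x1 < x2 then intersection_set t1 (x2 :: t2)
    else intersection_set (x1 :: t1) t2

-- ===== PORT B =====
-- B's while loop: indices i, j into the fixed lists, an output accumulator appended to.
-- The loop is transcribed with a fuel bound (n + m, an upper bound on the number of iterations),
-- recursing structurally on the fuel; the guard i < n && j < m is the loop condition itself.
def intersection_set_go (s1 s2 : List Int) : Nat → Nat → Nat → List Int → List Int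
  | 0, _, _, out => out
  | fuel + 1, i, j, out =>
    if h : i < s1.length ∧ j < s2.length then
      let a := s1[i]'h.1
      let b := s2[j]'h.2
      if a = b then intersection_set_go s1 s2 fuel (i+1) (j+1) (out ++ [a])
      else if a < b then intersection_set_go s1 s2 fuel (i+1) j out
      else intersection_set_go s1 s2 fuel i (j+1) out
    else out

def intersection_set_alt (set1 : List Int) (set2 : List Int) : List Int :=
  intersection_set_go set1 set2 (set1.length + set2.length) 0 0 []

-- ===== PRECONDITION & SPEC =====
def Spec_intersection_set (set1 : List Int) (set2 : List Int) (out : List Int) : Prop := out = intersection_set_alt set1 set2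
instance (set1 : List Int) (set2 : List Int) (out : List Int) : Decidable (Spec_intersection_set set1 set2 out) := by unfold Spec_intersection_set; infer_instance

-- ===== CLAIM (what is proved, stated in full; the proofs are below) =====
def Claim_equal_intersection_set : Prop := ∀ (set1 : List Int) (set2 : List Int), Dom_intersection_set set1 set2 → Spec_intersection_set set1 set2 (intersection_set set1 set2)

-- ===== LEMMAS AND PROOFS =====

-- Loop invariant: with enough fuel, the loop from indices (i, j) appends exactly A's result
-- on the remaining suffixes.
theorem intersection_set_go_eq (s1 s2 : List Int) (fuel : Nat) :
    ∀ (i j : Nat) (out : List Int), s1.length - i + (s2.length - j) ≤ fuel →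
      intersection_set_go s1 s2 fuel i j out = out ++ intersection_set (s1.drop i) (s2.drop j) := by
  induction fuel with
  | zero =>
    intro i j out hle
    have h1 : s1.length ≤ i := by omega
    rw [intersection_set_go, List.drop_eq_nil_of_le h1]
    simp [intersection_set]
  | succ fuel ih =>
    intro i j out hle
    rw [intersection_set_go]
    by_cases h : i < s1.length ∧ j < s2.length
    · rw [dif_pos h]
      simp only []
      by_cases hab : s1[i]'h.1 = s2[j]'h.2
      · rw [if_pos hab, ih _ _ _ (by omega),
            List.drop_eq_getElem_cons h.1, List.drop_eq_getElem_cons h.2]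
        simp only [intersection_set]
        rw [if_pos hab]
        simp
      · rw [if_neg hab]
        by_cases hlt : s1[i]'h.1 < s2[j]'h.2
        · rw [if_pos hlt, ih _ _ _ (by omega),
              List.drop_eq_getElem_cons h.1, List.drop_eq_getElem_cons h.2]
          simp only [intersection_set]
          rw [if_neg hab, if_pos hlt]
        · rw [if_neg hlt, ih _ _ _ (by omega),
              List.drop_eq_getElem_cons h.1, List.drop_eq_getElem_cons h.2]
          simp only [intersection_set]
          rw [if_neg hab, if_neg hlt]
    · rw [dif_neg h]
      rcases Nat.lt_or_ge i s1.length with h1 | h1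
      · have h2 : s2.length ≤ j := by
          rcases not_and_or.mp h with h' | h' <;> omega
        rw [List.drop_eq_nil_of_le h2]
        cases s1.drop i <;> simp [intersection_set]
      · rw [List.drop_eq_nil_of_le h1]
        simp [intersection_set]

-- ===== VERDICT (by name: the statement is the Claim_ definition above) =====
theorem intersection_set_spec : Claim_equal_intersection_set := by
  intro set1 set2 _
  unfold Spec_intersection_set intersection_set_alt
  rw [intersection_set_go_eq _ _ _ _ _ _ (by omega)]
  simp
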